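-- pv_equiv track=rewrite | github.com/mmmmmmmadman/MADZINE-VCV | Manual/migrate_to_yaml.py | unescape_cpp
-- ===== SOURCE A (Python) =====
-- def unescape_cpp(s):
--     """Reverse escape_cpp: \\n \\\" \\\\ -> actual chars."""
--     result = []
--     i = 0
--     while i < len(s):
--         c = s[i]
--         if c == "\\" and i + 1 < len(s):
--             nxt = s[i + 1]
--             if nxt == "n":
--                 result.append("\n")
--             elif nxt == "t":
--                 result.append("\t")
--             elif nxt == "\"":
--                 result.append("\"")
--             elif nxt == "\\":
--                 result.append("\\")
--             else:
--                 result.append(nxt)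
--             i += 2
--         else:
--             result.append(c)
--             i += 1
--     return "".join(result)
-- ===== SOURCE B (Python) =====
-- def unescape_cpp(s):
--     mapping = {"n": "\n", "t": "\t"}
--     parts = s.split("\\")
--     out = [parts[0]]
--     skip = False
--     for p in parts[1:]:
--         if skip:
--             out.append(p)
--             skip = False
--         elif p == "":
--             out.append("\\")
--             skip = True
--         else:
--             out.append(mapping.get(p[0], p[0]) + p[1:])
--     return "".join(out)
-- ===== Notes on version B (the rewrite author's own statement) =====
-- stated objective: faster
-- what changed: Replaced the index-driven while loop over single characters by split-on-backslash plus one flag-driven pass over the chunks (an empty chunk marks an escaped backslash whose following chunk is copied verbatim), with a dict for the n/t translations.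
import Mathlib
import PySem

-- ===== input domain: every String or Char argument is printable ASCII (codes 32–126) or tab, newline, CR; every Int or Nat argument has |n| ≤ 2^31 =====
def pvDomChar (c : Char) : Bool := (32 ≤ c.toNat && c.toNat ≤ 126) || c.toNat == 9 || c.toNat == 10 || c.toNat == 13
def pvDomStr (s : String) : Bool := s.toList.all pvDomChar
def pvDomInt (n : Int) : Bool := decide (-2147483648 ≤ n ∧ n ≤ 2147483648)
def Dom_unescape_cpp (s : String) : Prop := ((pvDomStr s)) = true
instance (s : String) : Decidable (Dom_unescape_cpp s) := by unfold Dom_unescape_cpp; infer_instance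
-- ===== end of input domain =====

-- B replaces A's per-character while loop by split-on-backslash plus one flag-driven
-- pass over the chunks; a timing run measured B faster (chunk-wise C-level split/join
-- instead of a per-character Python loop).

-- ===== PORT A =====
-- A's while loop over the index i, transcribed as structural recursion on the character
-- list: each step consumes one character, or two when a backslash has a successor.
def unescapeA : List Char → List Char
  | [] => []
  | c :: rest =>
    if c = '\\' then
      match rest with
      | [] => c :: unescapeA []            -- 'i + 1 < len(s)' fails: append c, i += 1
      | nxt :: rest' =>
        (if nxt = 'n' then '\n'
         else if nxt = 't' then '\t'
         else if nxt = '"' then '"'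
         else if nxt = '\\' then '\\'
         else nxt) :: unescapeA rest'      -- i += 2
    else c :: unescapeA rest               -- ordinary character, i += 1

def unescape_cpp (s : String) : String := String.mk (unescapeA s.toList)

-- ===== PORT B =====
-- mapping = {"n": "\n", "t": "\t"} (keyed by the single character p[0])
def pvMapping : PySem.Dict Char Char := PySem.Dict.mk [('n', '\n'), ('t', '\t')]

-- the loop body of Source B; state = (out, skip)
def pvStep (acc : List (List Char) × Bool) (p : List Char) : List (List Char) × Bool :=
  if acc.2 then (acc.1 ++ [p], false)                          -- chunk after an escaped backslash: verbatim
  else match p with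
    | [] => (acc.1 ++ [['\\']], true)                          -- empty chunk = escaped backslash
    | h :: t => (acc.1 ++ [pvMapping.getD h h :: t], false)    -- translate the chunk's first character

def unescape_cpp_alt (s : String) : String :=
  match s.toList.splitOn '\\' with      -- parts = s.split("\\")
  | [] => ""                            -- unreachable: split never returns an empty list
  | p0 :: rest =>
    String.mk (PySem.Chars.join [] (rest.foldl pvStep ([p0], false)).1)  -- "".join(out)

-- ===== PRECONDITION & SPEC =====
def Spec_unescape_cpp (s : String) (out : String) : Prop := out = unescape_cpp_alt s
instance (s : String) (out : String) : Decidable (Spec_unescape_cpp s out) := by unfold Spec_unescape_cpp; infer_instance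

-- ===== CLAIM (what is proved, stated in full; the proofs are below) =====
def Claim_equal_unescape_cpp : Prop := ∀ (s : String), Dom_unescape_cpp s → Spec_unescape_cpp s (unescape_cpp s)

-- ===== LEMMAS AND PROOFS =====

-- recursive form of B's flag-driven pass; the foldl of the port is related to it below
def bLoop : Bool → List (List Char) → List (List Char)
  | _, [] => []
  | true, p :: rest => p :: bLoop false rest
  | false, [] :: rest => ['\\'] :: bLoop true rest
  | false, (h :: t) :: rest => (pvMapping.getD h h :: t) :: bLoop false rest

theorem foldl_pvStep (rest : List (List Char)) : ∀ (acc : List (List Char)) (sk : Bool),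
    (rest.foldl pvStep (acc, sk)).1 = acc ++ bLoop sk rest := by
  induction rest with
  | nil => intro acc sk; simp [bLoop]
  | cons p rest ih =>
    intro acc sk
    cases sk with
    | true => simp [pvStep, bLoop, ih, List.append_assoc]
    | false =>
      cases p with
      | nil => simp [pvStep, bLoop, ih, List.append_assoc]
      | cons h t => simp [pvStep, bLoop, ih, List.append_assoc]

theorem join_nil_flatten (parts : List (List Char)) :
    PySem.Chars.join [] parts = parts.flatten := by
  induction parts with
  | nil => simp [PySem.Chars.join, List.intercalate]
  | cons p ps ih =>
    cases ps with
    | nil => simp [PySem.Chars.join, List.intercalate]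
    | cons q qs =>
      simp [PySem.Chars.join, List.intercalate] at ih ⊢
      simp [List.intersperse_cons₂, ih]

theorem splitOn_eq_splitOnP (cs : List Char) :
    cs.splitOn '\\' = cs.splitOnP (· == '\\') := rfl

-- the main invariant: A's scan equals head chunk ++ B's flag-driven pass over the rest
theorem unescapeA_eq (cs : List Char) :
    unescapeA cs =
      (cs.splitOn '\\').headI ++ (bLoop false (cs.splitOn '\\').tail).flatten := by
  induction cs using unescapeA.induct with
  | case1 => simp [unescapeA, List.splitOn_nil, bLoop]
  | case2 ih =>
    simp [unescapeA, splitOn_eq_splitOnP, List.splitOnP_cons, List.splitOnP_nil, bLoop]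
  | case3 nxt rest' ih =>
    rw [unescapeA]
    simp only [if_pos rfl]
    have hne := List.splitOnP_ne_nil (· == '\\') rest'
    obtain ⟨r0, rs, hr⟩ : ∃ r0 rs, rest'.splitOnP (· == '\\') = r0 :: rs := by
      cases h : rest'.splitOnP (· == '\\') with
      | nil => exact absurd h hne
      | cons a b => exact ⟨a, b, rfl⟩
    by_cases hn : nxt = '\\'
    · subst hn
      simp only [splitOn_eq_splitOnP, List.splitOnP_cons] at ih ⊢
      simp only [beq_self_eq_true, if_pos rfl, hr] at ih ⊢
      simp [bLoop, ih]
    · simp only [splitOn_eq_splitOnP, List.splitOnP_cons] at ih ⊢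
      have hb : (nxt == '\\') = false := by simp [hn]
      simp only [beq_self_eq_true, hr, hb, Bool.false_eq_true, if_false,
        List.modifyHead] at ih ⊢
      simp [bLoop] at ih ⊢
      rw [ih]
      refine ⟨?_, rfl⟩
      by_cases h1 : nxt = 'n'
      · subst h1; decide
      by_cases h2 : nxt = 't'
      · subst h2; decide
      have e1 : ('n' == nxt) = false := by simp [Ne.symm h1]
      have e2 : ('t' == nxt) = false := by simp [Ne.symm h2]
      simp only [pvMapping, PySem.Dict.getD, PySem.Dict.get?, List.find?, e1, e2]
      simp [hn, h1, h2]
      intro h3; exact h3.symm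
  | case4 c rest h ih =>
    rw [unescapeA.eq_def]
    simp only [if_neg h]
    have hne := List.splitOnP_ne_nil (· == '\\') rest
    obtain ⟨r0, rs, hr⟩ : ∃ r0 rs, rest.splitOnP (· == '\\') = r0 :: rs := by
      cases hh : rest.splitOnP (· == '\\') with
      | nil => exact absurd hh hne
      | cons a b => exact ⟨a, b, rfl⟩
    have hb : (c == '\\') = false := by simp [h]
    simp only [splitOn_eq_splitOnP, List.splitOnP_cons, hb, Bool.false_eq_true, if_false,
      hr, List.modifyHead] at ih ⊢
    simp [ih]

-- ===== VERDICT (by name: the statement is the Claim_ definition above) =====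
theorem unescape_cpp_spec : Claim_equal_unescape_cpp := by
  intro s _
  unfold Spec_unescape_cpp unescape_cpp unescape_cpp_alt
  have hne := List.splitOnP_ne_nil (· == '\\') s.toList
  cases h : s.toList.splitOn '\\' with
  | nil => exact absurd (splitOn_eq_splitOnP s.toList ▸ h) hne
  | cons p0 rest =>
    rw [unescapeA_eq s.toList, h]
    dsimp only
    rw [foldl_pvStep, join_nil_flatten]
    simp
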